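-- pv_equiv track=rewrite | github.com/regiellis/civitai-models-cli | civitai_models_manager/modules/remove.py | group_models_alphabetically
-- ===== SOURCE A (Python) =====
-- from typing import List, Tuple
--
-- def group_models_alphabetically(models: List[Tuple[str, str, str, str]]) -> dict:
--     grouped = {}
--     for model in models:
--         first_letter = model[0][0].upper()
--         if first_letter not in grouped:
--             grouped[first_letter] = []
--         grouped[first_letter].append(model)
--     return grouped
-- ===== SOURCE B (Python) =====
-- def group_models_alphabetically(models):
--     letters = list(dict.fromkeys(m[0][0].upper() for m in models))
--     return {letter: [m for m in models if m[0][0].upper() == letter]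
--             for letter in letters}
-- ===== Notes on version B (the rewrite author's own statement) =====
-- stated objective: alternative
-- what changed: B replaces A's single accumulating pass (ensure-key-then-append into a dict) by a two-phase plan: first collect the distinct first letters in order of first appearance (dict.fromkeys), then build each group with an independent filter pass over the input.
import Mathlib
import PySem

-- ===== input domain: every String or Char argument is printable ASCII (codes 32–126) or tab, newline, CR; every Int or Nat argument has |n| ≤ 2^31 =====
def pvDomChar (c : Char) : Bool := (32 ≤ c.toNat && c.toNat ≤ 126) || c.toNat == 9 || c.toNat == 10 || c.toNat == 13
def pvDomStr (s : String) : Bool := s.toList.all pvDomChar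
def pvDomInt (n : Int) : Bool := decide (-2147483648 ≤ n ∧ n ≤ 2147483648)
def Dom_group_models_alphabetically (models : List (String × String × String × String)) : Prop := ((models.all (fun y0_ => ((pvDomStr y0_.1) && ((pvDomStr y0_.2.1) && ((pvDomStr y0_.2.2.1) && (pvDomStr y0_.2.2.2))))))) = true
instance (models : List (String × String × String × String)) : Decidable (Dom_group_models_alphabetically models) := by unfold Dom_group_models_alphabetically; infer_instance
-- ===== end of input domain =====

-- B builds the grouping in two phases (ordered dedup of first letters, then one filter per letter)
-- instead of A's single accumulating dict pass; same return value, stated objective: alternative.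
-- Both programs raise IndexError when some model's first field is empty; Pre_ excludes exactly that.


-- ===== PORT A =====
-- model[0][0].upper(): first character of the first field, uppercased (as a 1-char string).
-- PySem.Str.pyGet? is none exactly where Python raises IndexError; Pre_ rules that out, the
-- .getD ' ' default is never reached on admitted inputs.
def pvFirstLetter (m : String × String × String × String) : String :=
  PySem.Str.upper (String.ofList [(PySem.Str.pyGet? m.1 0).getD ' '])

def group_models_alphabetically (models : List (String × String × String × String)) : List (String × List (String × String × String × String)) :=
  (models.foldl
    (fun grouped model =>
      let fl := pvFirstLetter model
      let grouped := if grouped.contains fl then grouped else grouped.insert fl []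
      grouped.insert fl (grouped.getD fl [] ++ [model]))
    PySem.Dict.empty).items

-- ===== PORT B =====
def group_models_alphabetically_alt (models : List (String × String × String × String)) : List (String × List (String × String × String × String)) :=
  let letters := PySem.List.dedup (models.map pvFirstLetter)
  letters.map (fun letter => (letter, models.filter (fun m => pvFirstLetter m == letter)))

-- ===== PRECONDITION & SPEC =====
-- Pre_ excludes exactly the inputs where A raises IndexError: a model whose first field is "".
def Pre_group_models_alphabetically (models : List (String × String × String × String)) : Prop :=
  ∀ m ∈ models, m.1 ≠ ""
instance (models : List (String × String × String × String)) : Decidable (Pre_group_models_alphabetically models) := by unfold Pre_group_models_alphabetically; infer_instance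

def pvWitness_group_models_alphabetically : (List (String × String × String × String)) :=
  [("alpha", "a", "b", "c"), ("Beta", "x", "y", "z"), ("apple", "1", "2", "3")]

def Spec_group_models_alphabetically (models : List (String × String × String × String)) (out : List (String × List (String × String × String × String))) : Prop := out = group_models_alphabetically_alt models
instance (models : List (String × String × String × String)) (out : List (String × List (String × String × String × String))) : Decidable (Spec_group_models_alphabetically models out) := by unfold Spec_group_models_alphabetically; infer_instance

-- ===== CLAIM (what is proved, stated in full; the proofs are below) =====
def Claim_equal_group_models_alphabetically : Prop := ∀ (models : List (String × String × String × String)), Dom_group_models_alphabetically models → Pre_group_models_alphabetically models → Spec_group_models_alphabetically models (group_models_alphabetically models)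

-- ===== LEMMAS AND PROOFS =====

-- One step of A's loop is exactly d[k] = d.get(k, []) + [m] (PySem.Dict.modify).
theorem pvStepEq (d : PySem.Dict String (List (String × String × String × String)))
    (k : String) (m : String × String × String × String) :
    (let d' := if d.contains k then d else d.insert k [];
     d'.insert k (d'.getD k [] ++ [m])) = d.modify k [] (· ++ [m]) := by
  by_cases h : d.contains k
  · simp [h, PySem.Dict.modify]
  · show (let d' := if d.contains k then d else d.insert k [];
      d'.insert k (d'.getD k [] ++ [m])) = _
    rw [if_neg h]
    show (d.insert k []).insert k ((d.insert k []).getD k [] ++ [m]) = _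
    rw [PySem.Dict.getD_insert_self, PySem.Dict.insert_insert_self, PySem.Dict.modify,
        PySem.Dict.getD_of_not_contains (h := by simpa using h)]

theorem pvMainEq (models : List (String × String × String × String)) :
    group_models_alphabetically models = group_models_alphabetically_alt models := by
  unfold group_models_alphabetically group_models_alphabetically_alt
  have hfold : models.foldl
      (fun grouped model =>
        let fl := pvFirstLetter model
        let grouped := if grouped.contains fl then grouped else grouped.insert fl []
        grouped.insert fl (grouped.getD fl [] ++ [model]))
      PySem.Dict.empty
      = models.foldl (fun d m => d.modify (pvFirstLetter m) [] (· ++ [m])) PySem.Dict.empty := by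
    congr 1
    funext d m
    exact pvStepEq d (pvFirstLetter m) m
  rw [hfold]
  set D := models.foldl (fun d m => d.modify (pvFirstLetter m) [] (· ++ [m])) PySem.Dict.empty with hD
  have hnodup : D.keys.Nodup := by
    rw [hD]
    exact PySem.Dict.nodup_keys_foldl_modify_key models pvFirstLetter [] _ _
      PySem.Dict.nodup_keys_empty
  have hkeys : D.keys = PySem.List.dedup (models.map pvFirstLetter) := by
    rw [hD, PySem.Dict.keys_foldl_modify_key, PySem.List.dedup_eq_ofList]
    simp [PySem.Set.update_nil_left]
  have hpair : D = (models.map (fun m => (pvFirstLetter m, m))).foldl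
      (fun d p => d.modify p.1 [] (· ++ [p.2])) PySem.Dict.empty := by
    rw [hD, List.foldl_map]
  have hgetD : ∀ c, D.getD c [] = models.filter (fun m => pvFirstLetter m == c) := by
    intro c
    rw [hpair, PySem.Dict.getD_foldl_modify_append]
    simp [List.filter_map, Function.comp_def]
  rw [PySem.Dict.items_eq_map_keys D hnodup []]
  rw [hkeys]
  exact List.map_congr_left (fun k _ => by rw [hgetD k])

-- ===== VERDICT (by name: the statement is the Claim_ definition above) =====
theorem group_models_alphabetically_spec : Claim_equal_group_models_alphabetically := by
  intro models _ _
  exact pvMainEq models
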